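-- pv_equiv track=rewrite | github.com/PawanGRG/CS50 | Week 6 - Python/Readability/readability.py | count
-- ===== SOURCE A (Python) =====
-- def count(text):
--     letters = 0
--     spaces = 0
--     punctuations = 0
--
--     for char in text:
--         if char.isalpha():
--             letters += 1
--         elif char == " ":
--             spaces += 1
--         elif char == "." or char == "!" or char == "?":
--             punctuations += 1
--
--     return letters, spaces + 1, punctuations
-- ===== SOURCE B (Python) =====
-- def count(text):
--     # One pass builds a character frequency table; the three results are then
--     # aggregated over the table's distinct keys instead of re-scanning the text.
--     freq = {}
--     for ch in text:
--         freq[ch] = freq.get(ch, 0) + 1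
--     letters = sum(n for ch, n in freq.items() if ch.isalpha())
--     return (letters,
--             freq.get(" ", 0) + 1,
--             freq.get(".", 0) + freq.get("!", 0) + freq.get("?", 0))
-- ===== Notes on version B (the rewrite author's own statement) =====
-- stated objective: idiomatic
-- what changed: B builds a character frequency table in one pass and then aggregates letters by summing counts over the table's distinct keys (and reads the space/punctuation counts from the table), instead of A's three-way branching classification inside the scan.
import Mathlib
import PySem

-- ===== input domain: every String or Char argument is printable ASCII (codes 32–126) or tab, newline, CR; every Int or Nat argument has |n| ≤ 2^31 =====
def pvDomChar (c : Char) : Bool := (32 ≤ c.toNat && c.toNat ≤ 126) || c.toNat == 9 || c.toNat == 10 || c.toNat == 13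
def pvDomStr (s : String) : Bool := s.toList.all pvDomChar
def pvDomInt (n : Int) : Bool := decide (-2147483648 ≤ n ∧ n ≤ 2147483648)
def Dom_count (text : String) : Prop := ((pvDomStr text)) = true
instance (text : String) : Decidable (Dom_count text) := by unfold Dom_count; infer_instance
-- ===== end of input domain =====

-- B replaces A's branching scan by a one-pass frequency table that is then
-- aggregated over its distinct keys (idiomatic Counter-style); return value only.

-- ===== PORT A =====
def count (text : String) : Int × Int × Int :=
  let r := text.toList.foldl
    (fun (s : Int × Int × Int) char =>
      if PySem.Chars.isalpha char then (s.1 + 1, s.2.1, s.2.2)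
      else if char = ' ' then (s.1, s.2.1 + 1, s.2.2)
      else if char = '.' ∨ char = '!' ∨ char = '?' then (s.1, s.2.1, s.2.2 + 1)
      else s)
    (0, 0, 0)
  (r.1, r.2.1 + 1, r.2.2)

-- ===== PORT B =====
def count_alt (text : String) : Int × Int × Int :=
  let freq : PySem.Dict Char Int :=
    text.toList.foldl (fun d ch => d.insert ch (d.getD ch 0 + 1)) PySem.Dict.empty
  let letters : Int :=
    freq.items.foldl (fun a p => if PySem.Chars.isalpha p.1 then a + p.2 else a) 0
  (letters, freq.getD ' ' 0 + 1, freq.getD '.' 0 + freq.getD '!' 0 + freq.getD '?' 0)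

-- ===== PRECONDITION & SPEC =====
def Spec_count (text : String) (out : Int × Int × Int) : Prop := out = count_alt text
instance (text : String) (out : Int × Int × Int) : Decidable (Spec_count text out) := by unfold Spec_count; infer_instance

-- ===== CLAIM (what is proved, stated in full; the proofs are below) =====
def Claim_equal_count : Prop := ∀ (text : String), Dom_count text → Spec_count text (count text)

-- ===== LEMMAS AND PROOFS =====

-- A's loop counts the three disjoint classes.
theorem countA_loop (l : List Char) (a b c : Int) :
    l.foldl
      (fun (s : Int × Int × Int) char =>
        if PySem.Chars.isalpha char then (s.1 + 1, s.2.1, s.2.2)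
        else if char = ' ' then (s.1, s.2.1 + 1, s.2.2)
        else if char = '.' ∨ char = '!' ∨ char = '?' then (s.1, s.2.1, s.2.2 + 1)
        else s)
      (a, b, c)
    = (a + l.countP PySem.Chars.isalpha, b + l.count ' ',
       c + (l.count '.' + l.count '!' + l.count '?')) := by
  induction l generalizing a b c with
  | nil => simp
  | cons x xs ih =>
    simp only [List.foldl_cons, List.countP_cons, List.count_cons]
    by_cases hα : PySem.Chars.isalpha x
    · have h1 : x ≠ ' ' := fun h => absurd (h ▸ hα) (by decide)
      have h2 : x ≠ '.' := fun h => absurd (h ▸ hα) (by decide)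
      have h3 : x ≠ '!' := fun h => absurd (h ▸ hα) (by decide)
      have h4 : x ≠ '?' := fun h => absurd (h ▸ hα) (by decide)
      rw [if_pos hα, ih]
      simp [hα, h1, h2, h3, h4]
      omega
    · by_cases hs : x = ' '
      · subst hs
        rw [if_neg (by decide), if_pos rfl, ih]
        simp
        omega
      · by_cases hp : x = '.' ∨ x = '!' ∨ x = '?'
        · rcases hp with rfl | rfl | rfl <;>
            · rw [if_neg (by decide), if_neg (by decide), if_pos (by decide), ih]
              simp
              omega
        · simp only [not_or] at hp
          rw [if_neg hα, if_neg hs, if_neg (by simp [hp.1, hp.2.1, hp.2.2]), ih]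
          simp [hα, hs, hp.1, hp.2.1, hp.2.2]
          all_goals omega

-- folding "if alpha then acc + value" = acc + sum of the alpha values
theorem foldl_if_add (L : List (Char × Int)) (a : Int) :
    L.foldl (fun a p => if PySem.Chars.isalpha p.1 then a + p.2 else a) a
    = a + ((L.filter (fun p => PySem.Chars.isalpha p.1)).map (·.2)).sum := by
  induction L generalizing a with
  | nil => simp
  | cons x xs ih =>
    by_cases h : PySem.Chars.isalpha x.1 <;> simp [h, ih] <;> ring

-- summing xs.count over the alpha members of xs's distinct keys = countP over xs
theorem sum_over_set_eq_countP (xs : List Char) (p : Char → Bool) :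
    (List.map (fun k => List.count k xs) (List.filter p (PySem.Set.ofList xs))).sum
      = xs.countP p := by
  have hperm : List.Perm (PySem.Set.ofList xs) xs.dedup := by
    rw [List.perm_ext_iff_of_nodup (PySem.Set.nodup_ofList xs) xs.nodup_dedup]
    intro a; simp [PySem.Set.mem_ofList]
  calc (List.map (fun k => List.count k xs) (List.filter p (PySem.Set.ofList xs))).sum
      = (List.map (fun k => List.count k xs) (List.filter p xs.dedup)).sum :=
        ((hperm.filter p).map _).sum_eq
    _ = xs.countP p := List.sum_map_count_dedup_filter_eq_countP p xs

-- casting a Nat-valued sum into Int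
theorem sum_map_intCast (S : List Char) (f : Char → Nat) :
    (S.map (fun k => ((f k : Nat) : Int))).sum = ((S.map f).sum : Int) := by
  induction S with
  | nil => simp
  | cons x xs ih => simp [ih]

theorem count_eq (text : String) : count text = count_alt text := by
  unfold count count_alt
  rw [countA_loop, PySem.Dict.foldl_insert_getD_add_one_eq_counter]
  simp only [PySem.Dict.getD_counter, PySem.Dict.items_counter, foldl_if_add]
  simp only [List.filter_map, List.map_map, Function.comp_def]
  simp only [Prod.mk.injEq]
  refine ⟨?_, by omega, by omega⟩
  rw [sum_map_intCast, sum_over_set_eq_countP]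

-- ===== VERDICT (by name: the statement is the Claim_ definition above) =====
theorem count_spec : Claim_equal_count := by
  intro text _
  unfold Spec_count
  exact count_eq text
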